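-- pv_equiv track=rewrite | github.com/RikJux/AdventOfCode2022 | day_8/day_8.py | visible_from_left
-- ===== SOURCE A (Python) =====
-- from operator import itemgetter, add, mul
--
-- def visible_from_left(tree_line):
--     is_visible = [False] * len(tree_line)
--     while True:
--         highest_tree_idx = max(enumerate(tree_line), key=itemgetter(1))[0]
--         tree_line = tree_line[:highest_tree_idx]
--         is_visible[highest_tree_idx] = True
--         if highest_tree_idx == 0:
--             break
--
--     return is_visible
-- ===== SOURCE B (Python) =====
-- def visible_from_left(tree_line):
--     # single left-to-right pass tracking the running maximum
--     result = []
--     cur = None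
--     for h in tree_line:
--         if cur is None or h > cur:
--             result.append(True)
--             cur = h
--         else:
--             result.append(False)
--     return result
-- ===== Notes on version B (the rewrite author's own statement) =====
-- stated objective: faster
-- what changed: Replaces the repeated max-of-prefix truncation loop (quadratic) by one left-to-right pass that marks an element visible iff it strictly exceeds the running maximum.
import Mathlib
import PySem

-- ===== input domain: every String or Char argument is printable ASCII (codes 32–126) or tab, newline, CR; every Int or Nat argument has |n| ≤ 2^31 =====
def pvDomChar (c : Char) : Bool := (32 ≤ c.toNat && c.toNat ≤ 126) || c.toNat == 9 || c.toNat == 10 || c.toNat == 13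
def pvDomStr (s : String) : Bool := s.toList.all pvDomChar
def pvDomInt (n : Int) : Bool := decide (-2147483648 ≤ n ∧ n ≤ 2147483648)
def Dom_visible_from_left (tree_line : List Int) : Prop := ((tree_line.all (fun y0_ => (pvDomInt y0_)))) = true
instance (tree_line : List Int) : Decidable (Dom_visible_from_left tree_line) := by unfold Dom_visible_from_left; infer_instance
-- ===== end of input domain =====

-- B replaces A's repeated max-of-prefix truncation loop by one left-to-right pass with a
-- running maximum.

-- ===== PORT A =====
-- first index of the maximum, as Python's max(enumerate(tree_line), key=itemgetter(1))[0]
-- computes it (scan left to right, replace the best only on strictly greater); ported by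
-- hand, exact: bi/bv are the best index/value so far, i the index of the head of the rest.
def pvFmi (bi : Nat) (bv : Int) (i : Nat) : List Int → Nat
  | [] => bi
  | x :: t => if x > bv then pvFmi i x (i+1) t else pvFmi bi bv (i+1) t

-- bound needed by pvALoop's termination
theorem pvFmi_lt (t : List Int) : ∀ (bi i : Nat) (bv : Int), bi < i → pvFmi bi bv i t < i + t.length := by
  induction t with
  | nil => intro bi i bv h; simpa [pvFmi] using h
  | cons x t ih =>
      intro bi i bv h
      simp only [pvFmi, List.length_cons]
      split
      · have := ih i (i+1) x (by omega); omega
      · have := ih bi (i+1) bv (by omega); omega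

-- the while-loop of A: tl is the (shrinking) tree_line, vis the is_visible array
def pvALoop (tl : List Int) (vis : List Bool) : List Bool :=
  match tl with
  | [] => vis
  | x :: t =>
    let idx := pvFmi 0 x 1 t
    let vis' := vis.set idx true
    if idx = 0 then vis' else pvALoop ((x :: t).take idx) vis'
termination_by tl.length
decreasing_by
  have h := pvFmi_lt t 0 1 x (by omega)
  simp only [List.length_take, List.length_cons]
  omega

def visible_from_left (tree_line : List Int) : List Bool :=
  pvALoop tree_line (List.replicate tree_line.length false)

-- ===== PORT B =====
-- one pass, state = running maximum (none before the first tree)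
def pvGo : Option Int → List Int → List Bool
  | _, [] => []
  | none, h :: t => true :: pvGo (some h) t
  | some c, h :: t => if h > c then true :: pvGo (some h) t else false :: pvGo (some c) t

def visible_from_left_alt (tree_line : List Int) : List Bool :=
  pvGo none tree_line

-- ===== PRECONDITION & SPEC =====
-- Pre_ excludes only the empty list, on which A raises ValueError (max of empty sequence).
def Pre_visible_from_left (tree_line : List Int) : Prop := tree_line ≠ []
instance (tree_line : List Int) : Decidable (Pre_visible_from_left tree_line) := by unfold Pre_visible_from_left; infer_instance
def pvWitness_visible_from_left : List Int := [3, 1, 4, 4, 5]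

def Spec_visible_from_left (tree_line : List Int) (out : List Bool) : Prop := out = visible_from_left_alt tree_line
instance (tree_line : List Int) (out : List Bool) : Decidable (Spec_visible_from_left tree_line out) := by unfold Spec_visible_from_left; infer_instance

-- ===== CLAIM (what is proved, stated in full; the proofs are below) =====
def Claim_equal_visible_from_left : Prop := ∀ (tree_line : List Int), Dom_visible_from_left tree_line → Pre_visible_from_left tree_line → Spec_visible_from_left tree_line (visible_from_left tree_line)

-- ===== LEMMAS AND PROOFS =====

-- state of B's pass after consuming a prefix
def pvRm : Option Int → List Int → Option Int
  | cur, [] => cur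
  | none, h :: t => pvRm (some h) t
  | some c, h :: t => pvRm (some (if h > c then h else c)) t

-- overlay of the marks bl onto the visibility array vis (or on the shared prefix)
def pvOrMerge (bl vis : List Bool) : List Bool :=
  List.zipWith (fun b v => b || v) bl vis ++ vis.drop bl.length

theorem pvFmi_spec (t : List Int) : ∀ (bi i : Nat) (bv : Int),
    (pvFmi bi bv i t = bi ∧ ∀ x ∈ t, x ≤ bv) ∨
    (∃ j, ∃ h : j < t.length, pvFmi bi bv i t = i + j ∧ bv < t[j] ∧
       (∀ x ∈ t.take j, x < t[j]) ∧ (∀ x ∈ t.drop (j+1), x ≤ t[j])) := by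
  induction t with
  | nil => intro bi i bv; left; exact ⟨rfl, by simp⟩
  | cons x t ih =>
      intro bi i bv
      by_cases hx : x > bv
      · simp only [pvFmi, if_pos hx]
        rcases ih i (i+1) x with ⟨hr, hall⟩ | ⟨j, hj, hr, hgt, htake, hdrop⟩
        · right
          refine ⟨0, by simp, by simpa using hr, by simpa using hx, by simp, ?_⟩
          simpa using hall
        · right
          refine ⟨j+1, by simpa using hj, by rw [hr]; omega, ?_, ?_, ?_⟩
          · simpa using (by omega : bv < t[j])
          · intro y hy
            simp only [List.take_succ_cons, List.mem_cons] at hy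
            rcases hy with rfl | hy
            · simpa using (by omega : y < t[j])
            · simpa using htake y hy
          · intro y hy
            simp only [List.drop_succ_cons] at hy
            simpa using hdrop y hy
      · simp only [pvFmi, if_neg hx]
        rcases ih bi (i+1) bv with ⟨hr, hall⟩ | ⟨j, hj, hr, hgt, htake, hdrop⟩
        · left
          refine ⟨hr, ?_⟩
          intro y hy
          rcases List.mem_cons.mp hy with rfl | hy
          · omega
          · exact hall y hy
        · right
          refine ⟨j+1, by simpa using hj, by rw [hr]; omega, ?_, ?_, ?_⟩
          · simpa using hgt
          · intro y hy
            simp only [List.take_succ_cons, List.mem_cons] at hy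
            rcases hy with rfl | hy
            · simpa using (by omega : y < t[j])
            · simpa using htake y hy
          · intro y hy
            simp only [List.drop_succ_cons] at hy
            simpa using hdrop y hy

theorem pvGo_len (cur : Option Int) (l : List Int) : (pvGo cur l).length = l.length := by
  induction l generalizing cur with
  | nil => cases cur <;> rfl
  | cons h t ih =>
      cases cur with
      | none => simp [pvGo, ih]
      | some c => by_cases hc : h > c <;> simp [pvGo, hc, ih]

theorem pvGo_append (p q : List Int) (cur : Option Int) :
    pvGo cur (p ++ q) = pvGo cur p ++ pvGo (pvRm cur p) q := by
  induction p generalizing cur with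
  | nil => simp [pvGo, pvRm]
  | cons h t ih =>
      cases cur with
      | none => simp [pvGo, pvRm, ih]
      | some c =>
          by_cases hc : h > c <;> simp [pvGo, pvRm, hc, ih]

theorem pvGo_all_le (m : Int) (s : List Int) (hs : ∀ x ∈ s, x ≤ m) :
    pvGo (some m) s = List.replicate s.length false := by
  induction s with
  | nil => rfl
  | cons h t ih =>
      have hh : ¬ h > m := by have := hs h (by simp); omega
      simp [pvGo, hh, List.replicate_succ]
      exact ih (fun x hx => hs x (by simp [hx]))

theorem pvRm_lt (m : Int) : ∀ (p : List Int), (∀ x ∈ p, x < m) → ∀ (cur : Option Int),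
    (∀ c, cur = some c → c < m) → ∀ c, pvRm cur p = some c → c < m := by
  intro p
  induction p with
  | nil => intro _ cur hcur c hc; exact hcur c hc
  | cons h t ih =>
      intro hp cur hcur c hc
      have hhm : h < m := hp h (by simp)
      cases cur with
      | none =>
          exact ih (fun x hx => hp x (by simp [hx])) (some h)
            (by intro c' hc'; cases hc'; exact hhm) c hc
      | some c0 =>
          have hc0 : c0 < m := hcur c0 rfl
          refine ih (fun x hx => hp x (by simp [hx])) (some (if h > c0 then h else c0)) ?_ c hc
          intro c' hc'; cases hc'; split <;> omega

theorem pvGo_rm_cons (p s : List Int) (m : Int) (hp : ∀ x ∈ p, x < m) (hs : ∀ x ∈ s, x ≤ m) :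
    pvGo (pvRm none p) (m :: s) = true :: List.replicate s.length false := by
  have hlt := pvRm_lt m p hp none (by intro c hc; cases hc)
  cases hrm : pvRm none p with
  | none => simp [pvGo, pvGo_all_le m s hs]
  | some c =>
      have hc : c < m := hlt c hrm
      have : m > c := hc
      simp [pvGo, this, pvGo_all_le m s hs]

theorem pvOrMerge_false (n : Nat) (vs : List Bool) (h : n ≤ vs.length) :
    List.zipWith (fun b v => b || v) (List.replicate n false) vs ++ vs.drop n = vs := by
  induction n generalizing vs with
  | zero => simp
  | succ n ih =>
      cases vs with
      | nil => simp at h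
      | cons v vt =>
          simp only [List.replicate_succ, List.zipWith_cons_cons, Bool.false_or,
            List.drop_succ_cons, List.cons_append]
          rw [ih vt (by simpa using h)]

theorem pvMerge_step (j : Nat) : ∀ (bl : List Bool) (vis : List Bool) (k : Nat), bl.length = k → k + 1 + j ≤ vis.length →
    pvOrMerge bl (vis.set k true) = pvOrMerge (bl ++ true :: List.replicate j false) vis := by
  intro bl
  induction bl with
  | nil =>
      intro vis k hk hlen
      subst hk
      cases vis with
      | nil => simp at hlen
      | cons v vt =>
          simp only [pvOrMerge, List.nil_append, List.zipWith_nil_left, List.length_nil,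
            List.drop_zero, List.set_cons_zero, List.length_cons, List.zipWith_cons_cons,
            Bool.true_or, List.length_replicate, List.drop_succ_cons]
          exact (congrArg (List.cons true) (pvOrMerge_false j vt (by simp at hlen; omega))).symm
  | cons b bt ih =>
      intro vis k hk hlen
      cases vis with
      | nil => simp at hlen
      | cons v vt =>
          cases k with
          | zero => simp at hk
          | succ k' =>
              simp only [List.set_cons_succ, pvOrMerge, List.zipWith_cons_cons,
                List.length_cons, List.drop_succ_cons, List.cons_append,
                List.length_append] at *
              have := ih vt k' (by omega) (by omega)
              rw [this]

theorem pvALoop_main (n : Nat) : ∀ (tl : List Int) (vis : List Bool), tl.length = n → tl ≠ [] → tl.length ≤ vis.length →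
    pvALoop tl vis = pvOrMerge (pvGo none tl) vis := by
  induction n using Nat.strong_induction_on with
  | _ n ih =>
    intro tl vis hn hne hlen
    cases tl with
    | nil => exact absurd rfl hne
    | cons x t =>
      rw [pvALoop]
      rcases pvFmi_spec t 0 1 x with ⟨hr, hall⟩ | ⟨j, hj, hr, hgt, htake, hdrop⟩
      · rw [hr]
        rw [if_pos rfl]
        cases vis with
        | nil => simp at hlen
        | cons v vt =>
            rw [List.set_cons_zero]
            have hgo : pvGo none (x :: t) = true :: List.replicate t.length false := by
              rw [show pvGo none (x :: t) = true :: pvGo (some x) t from rfl,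
                pvGo_all_le x t hall]
            rw [hgo]
            simp only [pvOrMerge, List.zipWith_cons_cons, Bool.true_or, List.length_cons,
              List.length_replicate, List.drop_succ_cons]
            exact (congrArg (List.cons true)
              (pvOrMerge_false t.length vt (by simp at hlen; omega))).symm
      · rw [hr]
        have hjne : 1 + j ≠ 0 := by omega
        rw [if_neg hjne]
        have htj : j + 1 ≤ t.length := hj
        have htake_len : ((x :: t).take (1 + j)).length = 1 + j := by
          simp [List.length_take]; omega
        have hstep := ih (1 + j) (by simp at hn; omega) ((x :: t).take (1 + j))
          (vis.set (1 + j) true)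
          htake_len (by simp) (by rw [htake_len]; simp at hlen ⊢; omega)
        rw [hstep]
        have hdecomp : x :: t = ((x :: t).take (1 + j)) ++ (t[j] :: t.drop (j + 1)) := by
          conv_lhs => rw [← List.take_append_drop (1 + j) (x :: t)]
          congr 1
          rw [show (1 : Nat) + j = j + 1 from by omega, List.drop_succ_cons,
            List.drop_eq_getElem_cons hj]
          rfl
        have hp : ∀ y ∈ (x :: t).take (1 + j), y < t[j] := by
          intro y hy
          rw [show (1 : Nat) + j = j + 1 from by omega, List.take_succ_cons] at hy
          rcases List.mem_cons.mp hy with rfl | hy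
          · exact hgt
          · exact htake y hy
        have hgo : pvGo none (x :: t) =
            pvGo none ((x :: t).take (1 + j)) ++
              (true :: List.replicate (t.drop (j + 1)).length false) := by
          conv_lhs => rw [hdecomp]
          rw [pvGo_append]
          exact congrArg (pvGo none ((x :: t).take (1 + j)) ++ ·)
            (pvGo_rm_cons ((x :: t).take (1 + j)) (t.drop (j + 1)) t[j] hp hdrop)
        rw [hgo]
        exact pvMerge_step (t.drop (j + 1)).length (pvGo none ((x :: t).take (1 + j)))
          vis (1 + j) (by rw [pvGo_len, htake_len]) (by simp at hlen ⊢; omega)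

-- ===== VERDICT (by name: the statement is the Claim_ definition above) =====
theorem visible_from_left_spec : Claim_equal_visible_from_left := by
  intro tl _ hpre
  unfold Spec_visible_from_left visible_from_left visible_from_left_alt
  rw [pvALoop_main tl.length tl _ rfl hpre (by simp)]
  unfold pvOrMerge
  rw [pvGo_len]
  rw [List.drop_replicate]
  simp only [Nat.sub_self, List.replicate_zero, List.append_nil]
  have hlen : ∀ (bl : List Bool), List.zipWith (fun b v => b || v) bl (List.replicate bl.length false) = bl := by
    intro bl; induction bl with
    | nil => rfl
    | cons b bs ih => simp [List.replicate_succ, ih]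
  rw [← pvGo_len none tl]; exact hlen _
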